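-- pv_equiv track=rewrite | github.com/pyscf/pyscf | future/dft/gen_grid.py | _num_angpt
-- ===== SOURCE A (Python) =====
-- def _num_angpt(charge, level=3):
--     atom_period = 0
--     tab = (2,8,8,18,18,32,32,50)
--     for i in range(7):
--         if charge < sum(tab[:i]):
--             break
--     atom_period = i
--
--     DefaultAngularGridLs = (9,11,17,23,29,35,47,59,71,89)
--     l = DefaultAngularGridLs[level-1 + atom_period-1]
--     return SPHERICAL_POINTS_ORDER[l]
--
-- SPHERICAL_POINTS_ORDER = {
--       0:    1,
--       3:    6,
--       5:   14,
--       7:   26,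
--       9:   38,
--      11:   50,
--      13:   74,
--      15:   86,
--      17:  110,
--      19:  146,
--      21:  170,
--      23:  194,
--      25:  230,
--      27:  266,
--      29:  302,
--      31:  350,
--      35:  434,
--      41:  590,
--      47:  770,
--      53:  974,
--      59: 1202,
--      65: 1454,
--      71: 1730,
--      77: 2030,
--      83: 2354,
--      89: 2702,
--      95: 3074,
--     101: 3470,
--     107: 3890,
--     113: 4334,
--     119: 4802,
--     125: 5294,
--     131: 5810
-- }
-- ===== SOURCE B (Python) =====
-- # Different algorithm: the periodic-table row is found by RECURSIVELY PEELING row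
-- # sizes off the charge (no prefix sums / thresholds), and the two table lookups
-- # (grid-L tuple then Lebedev dict) are FUSED into one precomputed points table.
--
-- # _NPTS[k] = SPHERICAL_POINTS_ORDER[DefaultAngularGridLs[k]]
-- _NPTS = (38, 50, 110, 194, 302, 434, 770, 1202, 1730, 2702)
-- _ROW_SIZES = (2, 8, 8, 18, 18, 32)
--
-- def _row(c, sizes):
--     if c < 0 or not sizes:
--         return 0
--     return 1 + _row(c - sizes[0], sizes[1:])
--
-- def _num_angpt(charge, level=3):
--     return _NPTS[level - 2 + _row(charge, _ROW_SIZES)]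
-- ===== Notes on version B (the rewrite author's own statement) =====
-- stated objective: alternative
-- what changed: B finds the periodic-table row by recursively subtracting row sizes from the charge (no running/prefix sums or break loop) and fuses the grid-L tuple and the Lebedev dict into one precomputed points table, so only a single indexed lookup remains.
import Mathlib
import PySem

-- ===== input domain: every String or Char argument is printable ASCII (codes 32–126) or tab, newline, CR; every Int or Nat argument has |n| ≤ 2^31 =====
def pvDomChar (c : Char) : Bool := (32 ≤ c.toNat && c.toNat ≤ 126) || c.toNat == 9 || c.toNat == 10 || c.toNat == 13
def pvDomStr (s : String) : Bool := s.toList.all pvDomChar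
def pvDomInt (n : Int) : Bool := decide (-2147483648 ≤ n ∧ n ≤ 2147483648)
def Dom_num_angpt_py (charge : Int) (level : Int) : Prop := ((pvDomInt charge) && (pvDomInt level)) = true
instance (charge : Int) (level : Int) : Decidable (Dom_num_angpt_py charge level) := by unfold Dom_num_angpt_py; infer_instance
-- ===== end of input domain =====

-- B finds the row by recursively peeling row sizes off the charge (no running-sum loop)
-- and fuses the grid-L tuple and the Lebedev dict into one precomputed points table.

-- Lebedev order table used by Python A (module constant SPHERICAL_POINTS_ORDER)
def sphericalPointsOrder : PySem.Dict Int Int := PySem.Dict.ofList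
  [(0, 1), (3, 6), (5, 14), (7, 26), (9, 38), (11, 50), (13, 74), (15, 86),
   (17, 110), (19, 146), (21, 170), (23, 194), (25, 230), (27, 266), (29, 302),
   (31, 350), (35, 434), (41, 590), (47, 770), (53, 974), (59, 1202), (65, 1454),
   (71, 1730), (77, 2030), (83, 2354), (89, 2702), (95, 3074), (101, 3470),
   (107, 3890), (113, 4334), (119, 4802), (125, 5294), (131, 5810)]

-- ===== PORT A =====
-- for i in range(7): if charge < sum(tab[:i]): break   — i keeps its last value after the loop
def numAngptLoopA (charge : Int) (tab : List Int) : List Int → Int → Int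
  | [], last => last
  | i :: rest, _ =>
      if charge < (PySem.List.slice tab none (some i)).sum then i
      else numAngptLoopA charge tab rest i

def num_angpt_py (charge : Int) (level : Int) : Int :=
  let tab : List Int := [2, 8, 8, 18, 18, 32, 32, 50]
  let atom_period := numAngptLoopA charge tab (PySem.List.pyRange 0 7 1) 0
  let defaultAngularGridLs : List Int := [9, 11, 17, 23, 29, 35, 47, 59, 71, 89]
  -- tuple index may be negative (Python wraps); Pre_ excludes exactly the IndexError range
  let l := PySem.List.pyGetD defaultAngularGridLs (level - 1 + atom_period - 1) 0
  -- every entry of defaultAngularGridLs is a key, so the dict lookup never raises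
  PySem.Dict.getD sphericalPointsOrder l 0

-- ===== PORT B =====
-- _row(c, sizes): 0 if c < 0 or sizes empty, else 1 + _row(c - sizes[0], sizes[1:])
def rowB (c : Int) : List Int → Int
  | [] => 0
  | s :: rest => if c < 0 then 0 else 1 + rowB (c - s) rest

def num_angpt_py_alt (charge : Int) (level : Int) : Int :=
  let npts : List Int := [38, 50, 110, 194, 302, 434, 770, 1202, 1730, 2702]
  PySem.List.pyGetD npts (level - 2 + rowB charge [2, 8, 8, 18, 18, 32]) 0

-- ===== PRECONDITION & SPEC =====
-- the atom period both programs compute, as a closed-form if-chain (used only to state Pre_)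
def pvPeriod (charge : Int) : Int :=
  if charge < 0 then 0 else if charge < 2 then 1 else if charge < 10 then 2
  else if charge < 18 then 3 else if charge < 36 then 4 else if charge < 54 then 5 else 6

-- Pre_ excludes exactly the inputs (extreme levels) where Python A raises IndexError
-- on the 10-entry grid tuple; B raises there identically.
def Pre_num_angpt_py (charge : Int) (level : Int) : Prop :=
  -10 ≤ level - 2 + pvPeriod charge ∧ level - 2 + pvPeriod charge < 10
instance (charge : Int) (level : Int) : Decidable (Pre_num_angpt_py charge level) := by
  unfold Pre_num_angpt_py; infer_instance

def pvWitness_num_angpt_py : Int × Int := (6, 3)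

def Spec_num_angpt_py (charge : Int) (level : Int) (out : Int) : Prop := out = num_angpt_py_alt charge level
instance (charge : Int) (level : Int) (out : Int) : Decidable (Spec_num_angpt_py charge level out) := by unfold Spec_num_angpt_py; infer_instance

-- ===== CLAIM (what is proved, stated in full; the proofs are below) =====
def Claim_equal_num_angpt_py : Prop := ∀ (charge : Int) (level : Int), Dom_num_angpt_py charge level → Pre_num_angpt_py charge level → Spec_num_angpt_py charge level (num_angpt_py charge level)

-- ===== LEMMAS AND PROOFS =====

-- A's loop computes the closed-form period
theorem loopA_eq_pvPeriod (charge : Int) :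
    numAngptLoopA charge [2, 8, 8, 18, 18, 32, 32, 50] (PySem.List.pyRange 0 7 1) 0 = pvPeriod charge := by
  have h : PySem.List.pyRange 0 7 1 = [0, 1, 2, 3, 4, 5, 6] := by decide
  rw [h]
  simp only [numAngptLoopA, pvPeriod]
  norm_num [PySem.List.slice]
  have e2 : (List.take (Int.toNat 2) ([2, 8, 8, 18, 18, 32, 32, 50] : List Int)).sum = 10 := by decide
  have e3 : (List.take (Int.toNat 3) ([2, 8, 8, 18, 18, 32, 32, 50] : List Int)).sum = 18 := by decide
  have e4 : (List.take (Int.toNat 4) ([2, 8, 8, 18, 18, 32, 32, 50] : List Int)).sum = 36 := by decide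
  have e5 : (List.take (Int.toNat 5) ([2, 8, 8, 18, 18, 32, 32, 50] : List Int)).sum = 54 := by decide
  simp only [e2, e3, e4, e5]

-- B's recursive peeling computes the same closed-form period
theorem rowB_eq_pvPeriod (charge : Int) :
    rowB charge [2, 8, 8, 18, 18, 32] = pvPeriod charge := by
  simp only [rowB, pvPeriod]
  split_ifs <;> omega

-- the fused points table agrees with A's two-stage lookup on every index in range
-- (negative indices wrap identically through both routes)
theorem fused_lookup (idx : Int) (h1 : -10 ≤ idx) (h2 : idx < 10) :
    PySem.List.pyGetD [38, 50, 110, 194, 302, 434, 770, 1202, 1730, 2702] idx 0 =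
      PySem.Dict.getD sphericalPointsOrder
        (PySem.List.pyGetD [9, 11, 17, 23, 29, 35, 47, 59, 71, 89] idx 0) 0 := by
  interval_cases idx <;> decide

-- ===== VERDICT (by name: the statement is the Claim_ definition above) =====
theorem num_angpt_py_spec : Claim_equal_num_angpt_py := by
  intro charge level _ hpre
  unfold Spec_num_angpt_py num_angpt_py num_angpt_py_alt
  simp only [loopA_eq_pvPeriod, rowB_eq_pvPeriod]
  have h : level - 1 + pvPeriod charge - 1 = level - 2 + pvPeriod charge := by ring
  rw [h]
  exact (fused_lookup _ hpre.1 hpre.2).symm
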